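-- pv_equiv track=rewrite | github.com/mbaljko/vault-grading-pipeline | 01_units/pipelines/pl1C_rubric_devt/python/execute-layer3-component-scoring-modules.py | build_dimension_indicator_groups
-- ===== SOURCE A (Python) =====
-- def parse_bound_ids(raw_value: object) -> list[str]:
-- 	return [part.strip() for part in str(raw_value or "").split(",") if part.strip()]
--
-- def build_dimension_indicator_groups(
-- 	submission_groups: dict[str, list[dict[str, str]]],
-- 	bound_dimension_ids: list[str],
-- 	dimension_id_field: str,
-- ) -> list[tuple[str, list[str]]]:
-- 	indicator_ids_by_dimension: dict[str, list[str]] = {dimension_id: [] for dimension_id in bound_dimension_ids}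
-- 	for submission_rows in submission_groups.values():
-- 		for row in submission_rows:
-- 			dimension_id = str(row.get(dimension_id_field, "")).strip()
-- 			if dimension_id not in indicator_ids_by_dimension or indicator_ids_by_dimension[dimension_id]:
-- 				continue
-- 			indicator_ids_by_dimension[dimension_id] = parse_bound_ids(row.get("bound_indicator_ids", ""))
-- 	return [(dimension_id, indicator_ids_by_dimension.get(dimension_id, [])) for dimension_id in bound_dimension_ids]
-- ===== SOURCE B (Python) =====
-- def parse_bound_ids(raw_value: object) -> list[str]:
-- 	return [part.strip() for part in str(raw_value or "").split(",") if part.strip()]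
--
-- def build_dimension_indicator_groups(
-- 	submission_groups: dict[str, list[dict[str, str]]],
-- 	bound_dimension_ids: list[str],
-- 	dimension_id_field: str,
-- ) -> list[tuple[str, list[str]]]:
-- 	all_rows = [row for rows in submission_groups.values() for row in rows]
-- 	result: list[tuple[str, list[str]]] = []
-- 	for dimension_id in bound_dimension_ids:
-- 		found: list[str] = []
-- 		for row in all_rows:
-- 			if str(row.get(dimension_id_field, "")).strip() == dimension_id:
-- 				parsed = parse_bound_ids(row.get("bound_indicator_ids", ""))
-- 				if parsed:
-- 					found = parsed
-- 					break
-- 		result.append((dimension_id, found))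
-- 	return result
-- ===== Notes on version B (the rewrite author's own statement) =====
-- stated objective: alternative
-- what changed: A makes one pass over all rows maintaining a dict keyed by dimension id ('first non-empty parse wins'); B instead loops over bound_dimension_ids and for each one scans the flattened rows for the first row matching that id with a non-empty parsed indicator list, building the output directly.
import Mathlib
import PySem

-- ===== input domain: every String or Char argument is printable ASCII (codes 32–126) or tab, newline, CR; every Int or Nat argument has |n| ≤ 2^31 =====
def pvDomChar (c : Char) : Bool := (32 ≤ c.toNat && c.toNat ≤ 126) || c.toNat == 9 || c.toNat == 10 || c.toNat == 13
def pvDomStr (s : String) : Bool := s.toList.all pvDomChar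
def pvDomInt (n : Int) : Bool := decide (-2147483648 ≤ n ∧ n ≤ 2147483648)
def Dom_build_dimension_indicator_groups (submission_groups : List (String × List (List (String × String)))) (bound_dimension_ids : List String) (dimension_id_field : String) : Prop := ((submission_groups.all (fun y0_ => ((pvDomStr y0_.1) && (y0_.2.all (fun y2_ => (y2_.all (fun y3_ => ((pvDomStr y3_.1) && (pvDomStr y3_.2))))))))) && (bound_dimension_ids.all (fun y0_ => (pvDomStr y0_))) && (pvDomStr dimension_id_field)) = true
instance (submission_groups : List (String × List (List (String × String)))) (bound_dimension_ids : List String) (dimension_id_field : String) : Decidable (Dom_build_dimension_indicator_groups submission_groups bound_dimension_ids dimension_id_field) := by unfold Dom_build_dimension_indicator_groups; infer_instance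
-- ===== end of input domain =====

-- B replaces A's single-pass dict accumulation by a per-dimension scan of the flattened rows (objective: alternative decomposition).

-- row.get(k, "") : first match in the association list, "" if absent (exact for a Python dict row)
def pvRowGet (row : List (String × String)) (k : String) : String :=
  ((row.find? (fun p => p.1 == k)).map (·.2)).getD ""

-- parse_bound_ids: [part.strip() for part in str(raw_value or "").split(",") if part.strip()]
-- (shared helper of both Pythons; str(raw or "") is the identity on the String raw)
def pvParse (raw : String) : List String :=
  -- split? is exact for the non-empty separator ","; none is unreachable here
  (((PySem.Str.split? raw ",").getD []).map PySem.Str.strip).filter (fun p => p ≠ "")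

-- ===== PORT A =====
def pvStepA (dimension_id_field : String) (d : PySem.Dict String (List String)) (row : List (String × String)) : PySem.Dict String (List String) :=
  -- dimension_id = str(row.get(field, "")).strip(); not-in-dict / already-non-empty -> continue, else assign
  match d.get? (PySem.Str.strip (pvRowGet row dimension_id_field)) with
  | none => d
  | some v => if v ≠ [] then d
              else d.insert (PySem.Str.strip (pvRowGet row dimension_id_field))
                     (pvParse (pvRowGet row "bound_indicator_ids"))

def build_dimension_indicator_groups (submission_groups : List (String × List (List (String × String)))) (bound_dimension_ids : List String) (dimension_id_field : String) : List (String × List String) :=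
  let init : PySem.Dict String (List String) :=
    bound_dimension_ids.foldl (fun d i => d.insert i ([] : List String)) PySem.Dict.empty
  let final := submission_groups.foldl (fun d g => g.2.foldl (pvStepA dimension_id_field) d) init
  bound_dimension_ids.map (fun i => (i, final.getD i []))

-- ===== PORT B =====
def build_dimension_indicator_groups_alt (submission_groups : List (String × List (List (String × String)))) (bound_dimension_ids : List String) (dimension_id_field : String) : List (String × List String) :=
  let all_rows := submission_groups.flatMap (fun g => g.2)
  bound_dimension_ids.map (fun dimension_id =>
    (dimension_id,
      match all_rows.find? (fun row =>
          PySem.Str.strip (pvRowGet row dimension_id_field) == dimension_id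
            && !(pvParse (pvRowGet row "bound_indicator_ids")).isEmpty) with
      | some row => pvParse (pvRowGet row "bound_indicator_ids")
      | none => []))

-- ===== PRECONDITION & SPEC =====
def Spec_build_dimension_indicator_groups (submission_groups : List (String × List (List (String × String)))) (bound_dimension_ids : List String) (dimension_id_field : String) (out : List (String × List String)) : Prop := out = build_dimension_indicator_groups_alt submission_groups bound_dimension_ids dimension_id_field
instance (submission_groups : List (String × List (List (String × String)))) (bound_dimension_ids : List String) (dimension_id_field : String) (out : List (String × List String)) : Decidable (Spec_build_dimension_indicator_groups submission_groups bound_dimension_ids dimension_id_field out) := by unfold Spec_build_dimension_indicator_groups; infer_instance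

-- ===== CLAIM (what is proved, stated in full; the proofs are below) =====
def Claim_equal_build_dimension_indicator_groups : Prop := ∀ (submission_groups : List (String × List (List (String × String)))) (bound_dimension_ids : List String) (dimension_id_field : String), Dom_build_dimension_indicator_groups submission_groups bound_dimension_ids dimension_id_field → Spec_build_dimension_indicator_groups submission_groups bound_dimension_ids dimension_id_field (build_dimension_indicator_groups submission_groups bound_dimension_ids dimension_id_field)

-- ===== LEMMAS AND PROOFS =====

-- B's per-dimension answer: first row whose id matches with non-empty parse, else []
def pvFirstNZ (field : String) (rows : List (List (String × String))) (i : String) : List String :=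
  match rows.find? (fun row =>
      PySem.Str.strip (pvRowGet row field) == i
        && !(pvParse (pvRowGet row "bound_indicator_ids")).isEmpty) with
  | some row => pvParse (pvRowGet row "bound_indicator_ids")
  | none => []

lemma pv_foldl_flatten (field : String) (sg : List (String × List (List (String × String)))) (d : PySem.Dict String (List String)) :
    sg.foldl (fun d g => g.2.foldl (pvStepA field) d) d
      = (sg.flatMap (fun g => g.2)).foldl (pvStepA field) d := by
  induction sg generalizing d with
  | nil => rfl
  | cons g sg ih => simp [List.flatMap_cons, List.foldl_append, ih]

lemma pv_init_get? (bids : List String) (d : PySem.Dict String (List String)) (i : String) :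
    (bids.foldl (fun d i => d.insert i ([] : List String)) d).get? i
      = if i ∈ bids then some [] else d.get? i := by
  induction bids generalizing d with
  | nil => simp
  | cons b bids ih =>
    simp only [List.foldl_cons, ih, PySem.Dict.get?_insert, List.mem_cons]
    by_cases hb : i = b <;> by_cases hm : i ∈ bids <;> simp [hb, hm]

lemma pv_foldl_get? (field : String) (rows : List (List (String × String))) (d : PySem.Dict String (List String)) (i : String) :
    (rows.foldl (pvStepA field) d).get? i
      = match d.get? i with
        | none => none
        | some v => some (if v = [] then pvFirstNZ field rows i else v) := by
  induction rows generalizing d with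
  | nil =>
    cases h : d.get? i with
    | none => simp [h]
    | some v =>
      simp only [List.foldl_nil, h, pvFirstNZ, List.find?_nil]
      by_cases hv : v = [] <;> simp [hv]
  | cons r rows ih =>
    simp only [List.foldl_cons, ih]
    by_cases hid : PySem.Str.strip (pvRowGet r field) = i
    · cases h : d.get? i with
      | none =>
        have hstep : pvStepA field d r = d := by
          simp [pvStepA, hid, h]
        rw [hstep, h]
      | some v =>
        by_cases hv : v = []
        · subst hv
          have hstep : pvStepA field d r
              = d.insert i (pvParse (pvRowGet r "bound_indicator_ids")) := by
            simp [pvStepA, hid, h]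
          rw [hstep]
          simp only [PySem.Dict.get?_insert_self]
          by_cases hp : pvParse (pvRowGet r "bound_indicator_ids") = []
          · have hz : pvFirstNZ field (r :: rows) i = pvFirstNZ field rows i := by
              unfold pvFirstNZ
              rw [List.find?_cons_of_neg]
              simp [hid, hp]
            simp [hp, hz]
          · have hz : pvFirstNZ field (r :: rows) i
                = pvParse (pvRowGet r "bound_indicator_ids") := by
              unfold pvFirstNZ
              rw [List.find?_cons_of_pos]
              simp [hid, hp]
            simp [hp, hz]
        · have hstep : pvStepA field d r = d := by
            simp [pvStepA, hid, h, hv]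
          rw [hstep]
          simp only [h]
          simp [hv]
    · have hfz : pvFirstNZ field (r :: rows) i = pvFirstNZ field rows i := by
        unfold pvFirstNZ
        rw [List.find?_cons_of_neg]
        simp [hid]
      have hget : (pvStepA field d r).get? i = d.get? i := by
        unfold pvStepA
        cases h : d.get? (PySem.Str.strip (pvRowGet r field)) with
        | none => rfl
        | some w =>
          show (if w ≠ [] then d
              else d.insert (PySem.Str.strip (pvRowGet r field))
                     (pvParse (pvRowGet r "bound_indicator_ids"))).get? i = d.get? i
          by_cases hw : w = []
          · subst hw
            rw [if_neg (fun hc => hc rfl)]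
            apply PySem.Dict.get?_insert_of_ne
            exact fun h' => hid (Eq.symm h')
          · rw [if_pos hw]
      rw [hget, hfz]

lemma pv_entry_eq (field : String) (sg : List (String × List (List (String × String)))) (bids : List String) (i : String) (hi : i ∈ bids) :
    (sg.foldl (fun d g => g.2.foldl (pvStepA field) d)
        (bids.foldl (fun d i => d.insert i ([] : List String)) PySem.Dict.empty)).getD i []
      = pvFirstNZ field (sg.flatMap (fun g => g.2)) i := by
  rw [pv_foldl_flatten, PySem.Dict.getD_eq_get?_getD, pv_foldl_get?, pv_init_get? bids PySem.Dict.empty i]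
  simp [hi]

-- ===== VERDICT (by name: the statement is the Claim_ definition above) =====
theorem build_dimension_indicator_groups_spec : Claim_equal_build_dimension_indicator_groups := by
  intro sg bids field _
  unfold Spec_build_dimension_indicator_groups build_dimension_indicator_groups build_dimension_indicator_groups_alt
  apply List.map_congr_left
  intro i hi
  rw [pv_entry_eq field sg bids i hi]
  rfl
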